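-- pv_equiv track=rewrite | github.com/avneetkaur1103/workbook | HackerRank/InterviewKit/decibinary.py | dbvalues
-- ===== SOURCE A (Python) =====
-- def dbvalues(x):
--     i = 0
--     result = 0
--     while x:
--         result += (x % 10) * pow(2, i)
--         x = x//10
--         i += 1
--     return result
-- ===== SOURCE B (Python) =====
-- def dbvalues(x):
--     # Horner's method over the decimal string, most-significant digit first.
--     result = 0
--     for c in str(x):
--         result = result * 2 + (ord(c) - 48)
--     return result
-- ===== Notes on version B (the rewrite author's own statement) =====
-- stated objective: alternative
-- what changed: B reads the decimal digits from str(x) most-significant-first with a doubling Horner accumulator instead of A's least-significant-first while-loop that sums each digit times a growing power of two using repeated floor division.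
import Mathlib
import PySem

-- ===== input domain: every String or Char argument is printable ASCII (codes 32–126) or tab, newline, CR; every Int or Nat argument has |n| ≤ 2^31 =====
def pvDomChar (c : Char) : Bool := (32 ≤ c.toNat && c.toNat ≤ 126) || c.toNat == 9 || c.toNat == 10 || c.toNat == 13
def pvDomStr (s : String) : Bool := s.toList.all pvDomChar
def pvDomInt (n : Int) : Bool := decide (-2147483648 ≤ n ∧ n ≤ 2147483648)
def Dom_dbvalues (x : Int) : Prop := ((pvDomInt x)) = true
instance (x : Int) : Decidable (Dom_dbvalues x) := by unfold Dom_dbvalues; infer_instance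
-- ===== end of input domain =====

-- B replaces A's least-significant-first while-loop (sum of (x%10)*2^i with repeated
-- floor division) by a most-significant-first Horner fold over the decimal string str(x);
-- equivalence is proved for all non-negative inputs (A loops forever on negative x).


-- ===== PORT A =====
-- the while loop; on x < 0 the Python loop never terminates (x//10 stabilises at -1),
-- so the x < 0 branch is a totalising guard outside Pre_ (Pre_ requires 0 ≤ x)
def dbLoopA (x : Int) (i : Nat) (result : Int) : Int :=
  if x = 0 then result
  else if x < 0 then result
  else dbLoopA (PySem.Int.floordiv x 10) (i + 1) (result + PySem.Int.mod x 10 * 2 ^ i)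
termination_by x.toNat
decreasing_by
  simp [PySem.Int.floordiv, Int.fdiv_eq_ediv]
  omega

def dbvalues (x : Int) : Int := dbLoopA x 0 0

-- ===== PORT B =====
def dbvalues_alt (x : Int) : Int :=
  (PySem.Int.toStr x).toList.foldl (fun r c => r * 2 + ((c.toNat : Int) - 48)) 0

-- ===== PRECONDITION & SPEC =====
-- Pre_ excludes negative x, on which the Python A never returns (the while loop runs forever).
def Pre_dbvalues (x : Int) : Prop := 0 ≤ x
instance (x : Int) : Decidable (Pre_dbvalues x) := by unfold Pre_dbvalues; infer_instance
def pvWitness_dbvalues : Int := (2023)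
def Spec_dbvalues (x : Int) (out : Int) : Prop := out = dbvalues_alt x
instance (x : Int) (out : Int) : Decidable (Spec_dbvalues x out) := by unfold Spec_dbvalues; infer_instance

-- ===== CLAIM (what is proved, stated in full; the proofs are below) =====
def Claim_equal_dbvalues : Prop := ∀ (x : Int), Dom_dbvalues x → Pre_dbvalues x → Spec_dbvalues x (dbvalues x)

-- ===== LEMMAS AND PROOFS =====

-- reference value: the "decibinary" value of the decimal digits of n
def dbV (n : Nat) : Int :=
  if n = 0 then 0 else (n % 10 : Nat) + 2 * dbV (n / 10)
termination_by n
decreasing_by omega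

lemma dbV_zero : dbV 0 = 0 := by unfold dbV; simp

lemma dbV_pos (n : Nat) (h : n ≠ 0) : dbV n = (n % 10 : Nat) + 2 * dbV (n / 10) := by
  rw [dbV]; simp [h]

-- ---- A-side: the loop computes result + dbV x * 2^i ----
lemma dbLoopA_spec (n : Nat) : ∀ (i : Nat) (r : Int),
    dbLoopA (n : Int) i r = r + dbV n * 2 ^ i := by
  induction n using Nat.strong_induction_on with
  | _ n ih =>
    intro i r
    rw [dbLoopA.eq_def]
    by_cases h0 : n = 0
    · simp [h0, dbV_zero]
    · have hne : (n : Int) ≠ 0 := by exact_mod_cast h0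
      have hnneg : ¬ (n : Int) < 0 := by omega
      simp only [hne, hnneg, if_false]
      have hfd : PySem.Int.floordiv (n : Int) 10 = ((n / 10 : Nat) : Int) := by
        simp [PySem.Int.floordiv, Int.fdiv_eq_ediv]
      have hmd : PySem.Int.mod (n : Int) 10 = ((n % 10 : Nat) : Int) := by
        simp [PySem.Int.mod, Int.fmod_eq_emod]
      rw [hfd, hmd, ih (n / 10) (by omega) (i + 1) (r + ((n % 10 : Nat) : Int) * 2 ^ i)]
      rw [dbV_pos n h0]
      ring

-- ---- B-side: Horner over the decimal digit characters computes dbV ----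

lemma digitChar_val (m : Nat) (h : m < 10) :
    ((Nat.digitChar m).toNat : Int) - 48 = (m : Int) := by
  interval_cases m <;> decide

lemma toDigitsCore_acc (fuel : Nat) : ∀ (n : Nat) (ds : List Char),
    Nat.toDigitsCore 10 fuel n ds = Nat.toDigitsCore 10 fuel n [] ++ ds := by
  induction fuel with
  | zero => intro n ds; simp [Nat.toDigitsCore]
  | succ f ih =>
    intro n ds
    rw [Nat.toDigitsCore, Nat.toDigitsCore]
    by_cases h : n / 10 = 0
    · simp [h]
    · simp only [h, if_false]
      rw [ih (n / 10) [(n % 10).digitChar], ih (n / 10) ((n % 10).digitChar :: ds)]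
      simp

lemma toDigitsCore_fuel : ∀ (fuel fuel' n : Nat), n < fuel → n < fuel' →
    Nat.toDigitsCore 10 fuel n [] = Nat.toDigitsCore 10 fuel' n [] := by
  intro fuel
  induction fuel with
  | zero => intro fuel' n h; omega
  | succ f ih =>
    intro fuel' n h h'
    cases fuel' with
    | zero => omega
    | succ f' =>
      rw [Nat.toDigitsCore, Nat.toDigitsCore]
      by_cases hq : n / 10 = 0
      · simp [hq]
      · simp only [hq, if_false]
        rw [toDigitsCore_acc f, toDigitsCore_acc f',
          ih f' (n / 10) (by omega) (by omega)]

lemma toDigits_ten (n : Nat) (h : 10 ≤ n) :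
    Nat.toDigits 10 n = Nat.toDigits 10 (n / 10) ++ [(n % 10).digitChar] := by
  unfold Nat.toDigits
  rw [Nat.toDigitsCore]
  have hq : ¬ n / 10 = 0 := by omega
  simp only [hq, if_false]
  rw [toDigitsCore_acc n (n / 10) [(n % 10).digitChar],
    toDigitsCore_fuel n (n / 10 + 1) (n / 10) (by omega) (by omega)]

lemma toDigits_lt_ten (n : Nat) (h : n < 10) :
    Nat.toDigits 10 n = [n.digitChar] := by
  unfold Nat.toDigits
  rw [Nat.toDigitsCore]
  have hq : n / 10 = 0 := by omega
  simp [hq, Nat.mod_eq_of_lt h]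

lemma horner_toDigits (n : Nat) :
    (Nat.toDigits 10 n).foldl (fun r c => r * 2 + ((c.toNat : Int) - 48)) 0 = dbV n := by
  induction n using Nat.strong_induction_on with
  | _ n ih =>
    by_cases h : n < 10
    · rw [toDigits_lt_ten n h]
      by_cases h0 : n = 0
      · simp [h0, dbV_zero]; decide
      · rw [dbV_pos n h0]
        have : n / 10 = 0 := by omega
        simp [List.foldl, digitChar_val n h, this, dbV_zero, Nat.mod_eq_of_lt h]
    · rw [toDigits_ten n (by omega), List.foldl_append,
        ih (n / 10) (by omega)]
      simp only [List.foldl]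
      rw [digitChar_val (n % 10) (by omega), dbV_pos n (by omega)]
      ring

lemma dbvalues_alt_nonneg (x : Int) (hx : 0 ≤ x) : dbvalues_alt x = dbV x.toNat := by
  unfold dbvalues_alt
  rw [PySem.Int.toList_toStr]
  have hneg : ¬ x < 0 := by omega
  simp only [PySem.Int.toChars, hneg, if_false]
  rw [horner_toDigits]

-- ===== VERDICT (by name: the statement is the Claim_ definition above) =====
theorem dbvalues_spec : Claim_equal_dbvalues := by
  intro x _ hpre
  unfold Pre_dbvalues at hpre
  unfold Spec_dbvalues dbvalues
  rw [dbvalues_alt_nonneg x hpre]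
  have h := dbLoopA_spec x.toNat 0 0
  have hx : ((x.toNat : Int)) = x := by omega
  rw [hx] at h
  rw [h]
  simp
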